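-- pv_equiv track=rewrite | github.com/twopis/twopis | printWordOccurrences.py | getTokenContext
-- ===== SOURCE A (Python) =====
-- def getTokenContext(index, tokenList):
--     windowSize = 10
--     start = max(0, index - windowSize)
--     end = min(len(tokenList), index + windowSize + 1)
--
--     before = []
--     tok = []
--     after = []
--     for i in range(start, end):
--         # mark the target token with squiggles
--         if (i - start) == windowSize:
--             tok.append(tokenList[i])
--         elif (i - start) < windowSize:
--             before.append(tokenList[i])
--         else:
--             after.append(tokenList[i])
--
--     return [" ".join(before), tok[0], " ".join(after), " ".join(before[::-1])]
-- ===== SOURCE B (Python) =====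
-- def getTokenContext(index, tokenList):
--     # Slice-based partition: mid = start + windowSize is the marked token's position.
--     windowSize = 10
--     start = max(0, index - windowSize)
--     end = min(len(tokenList), index + windowSize + 1)
--     mid = start + windowSize
--     before = tokenList[start:mid]
--     after = tokenList[mid + 1:end]
--     return [" ".join(before), tokenList[mid], " ".join(after), " ".join(reversed(before))]
-- ===== Notes on version B (the rewrite author's own statement) =====
-- stated objective: simpler
-- what changed: Replaced A's index loop with a three-way branch (accumulating before/tok/after element by element) by a direct three-slice partition around mid = start + windowSize.
import Mathlib
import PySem

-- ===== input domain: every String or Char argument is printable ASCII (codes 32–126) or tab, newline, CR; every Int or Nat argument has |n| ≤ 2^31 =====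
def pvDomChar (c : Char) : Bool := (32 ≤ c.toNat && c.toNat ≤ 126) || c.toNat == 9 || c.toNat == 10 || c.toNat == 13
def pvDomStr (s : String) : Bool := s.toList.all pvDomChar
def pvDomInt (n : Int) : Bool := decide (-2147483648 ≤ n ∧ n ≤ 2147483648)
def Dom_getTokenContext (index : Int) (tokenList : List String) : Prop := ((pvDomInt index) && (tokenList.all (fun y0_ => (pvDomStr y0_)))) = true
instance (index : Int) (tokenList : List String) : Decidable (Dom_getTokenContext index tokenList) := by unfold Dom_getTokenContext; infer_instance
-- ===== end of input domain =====

-- B replaces A's index loop with a three-way branch by a direct slice partition (simpler); return-value equivalence only.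

-- ===== PORT A =====
-- loop body of A's for-loop, state (before, tok, after), branches in A's order
def stepA (tokenList : List String) (start windowSize : Int)
    (s : List String × List String × List String) (i : Int) :
    List String × List String × List String :=
  if i - start == windowSize then
    (s.1, s.2.1 ++ [(PySem.List.pyGet? tokenList i).getD ""], s.2.2)
  else if i - start < windowSize then
    (s.1 ++ [(PySem.List.pyGet? tokenList i).getD ""], s.2.1, s.2.2)
  else
    (s.1, s.2.1, s.2.2 ++ [(PySem.List.pyGet? tokenList i).getD ""])

def getTokenContext (index : Int) (tokenList : List String) : List String :=
  let windowSize : Int := 10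
  let start := max 0 (index - windowSize)
  let stop := min (tokenList.length : Int) (index + windowSize + 1)
  let st := (PySem.List.pyRange start stop).foldl (stepA tokenList start windowSize) ([], [], [])
  [PySem.Str.join " " st.1, (PySem.List.pyGet? st.2.1 0).getD "",
   PySem.Str.join " " st.2.2, PySem.Str.join " " st.1.reverse]

-- ===== PORT B =====
def getTokenContext_alt (index : Int) (tokenList : List String) : List String :=
  let windowSize : Int := 10
  let start := max 0 (index - windowSize)
  let stop := min (tokenList.length : Int) (index + windowSize + 1)
  let mid := start + windowSize
  let before := PySem.List.slice tokenList (some start) (some mid)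
  let after := PySem.List.slice tokenList (some (mid + 1)) (some stop)
  [PySem.Str.join " " before, (PySem.List.pyGet? tokenList mid).getD "",
   PySem.Str.join " " after, PySem.Str.join " " before.reverse]

-- ===== PRECONDITION & SPEC =====
-- Pre_ excludes exactly the inputs where A's tok[0] raises IndexError (no token lands at offset windowSize).
def Pre_getTokenContext (index : Int) (tokenList : List String) : Prop :=
  max 0 (index - 10) + 10 < min (tokenList.length : Int) (index + 11)
instance (index : Int) (tokenList : List String) : Decidable (Pre_getTokenContext index tokenList) := by unfold Pre_getTokenContext; infer_instance

def pvWitness_getTokenContext : Int × List String :=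
  (0, ["a", "b", "c", "d", "e", "f", "g", "h", "i", "j", "k"])

def Spec_getTokenContext (index : Int) (tokenList : List String) (out : List String) : Prop := out = getTokenContext_alt index tokenList
instance (index : Int) (tokenList : List String) (out : List String) : Decidable (Spec_getTokenContext index tokenList out) := by unfold Spec_getTokenContext; infer_instance

-- ===== CLAIM (what is proved, stated in full; the proofs are below) =====
def Claim_equal_getTokenContext : Prop := ∀ (index : Int) (tokenList : List String), Dom_getTokenContext index tokenList → Pre_getTokenContext index tokenList → Spec_getTokenContext index tokenList (getTokenContext index tokenList)

-- ===== LEMMAS AND PROOFS =====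

-- abbreviation used only in proofs
def fget (tokenList : List String) (i : Int) : String :=
  (PySem.List.pyGet? tokenList i).getD ""

-- the loop only appends to `before` while i - start < windowSize
lemma foldl_stepA_before (tokenList : List String) (start w : Int) :
    ∀ (l : List Int) (b t a : List String), (∀ i ∈ l, i - start < w) →
      l.foldl (stepA tokenList start w) (b, t, a) = (b ++ l.map (fget tokenList), t, a) := by
  intro l
  induction l with
  | nil => intro b t a _; simp
  | cons x xs ih =>
    intro b t a h
    have hx := h x (by simp)
    have : stepA tokenList start w (b, t, a) x
        = (b ++ [fget tokenList x], t, a) := by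
      unfold stepA
      rw [if_neg (by simpa using by omega : ¬ (x - start == w) = true), if_pos (by omega)]
      rfl
    simp only [List.foldl_cons, this, ih _ _ _ (fun i hi => h i (by simp [hi])), List.map_cons]
    simp

-- the loop only appends to `after` while i - start > windowSize
lemma foldl_stepA_after (tokenList : List String) (start w : Int) :
    ∀ (l : List Int) (b t a : List String), (∀ i ∈ l, w < i - start) →
      l.foldl (stepA tokenList start w) (b, t, a) = (b, t, a ++ l.map (fget tokenList)) := by
  intro l
  induction l with
  | nil => intro b t a _; simp
  | cons x xs ih =>
    intro b t a h
    have hx := h x (by simp)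
    have : stepA tokenList start w (b, t, a) x
        = (b, t, a ++ [fget tokenList x]) := by
      unfold stepA
      rw [if_neg (by simpa using by omega : ¬ (x - start == w) = true), if_neg (by omega)]
      rfl
    simp only [List.foldl_cons, this, ih _ _ _ (fun i hi => h i (by simp [hi])), List.map_cons]
    simp

-- mapping the element lookup over a range of valid indices is the corresponding take/drop window
lemma map_fget_pyRange (tokenList : List String) :
    ∀ (n p : Nat), p + n ≤ tokenList.length →
      (PySem.List.pyRange (p : Int) ((p + n : Nat) : Int)).map (fget tokenList)
        = (tokenList.drop p).take n := by
  intro n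
  induction n with
  | zero =>
    intro p _
    simp [PySem.List.pyRange]
  | succ n ih =>
    intro p hp
    have hlt : (p : Int) < ((p + (n + 1) : Nat) : Int) := by push_cast; omega
    rw [PySem.List.pyRange_one_cons hlt]
    have hplen : p < tokenList.length := by omega
    have h1 : ((p : Int) + 1) = ((p + 1 : Nat) : Int) := by push_cast; ring
    have h2 : ((p + (n + 1) : Nat) : Int) = (((p + 1) + n : Nat) : Int) := by push_cast; ring
    rw [List.map_cons, h1, h2, ih (p + 1) (by omega)]
    have hdrop : tokenList.drop p = tokenList[p] :: tokenList.drop (p + 1) :=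
      List.drop_eq_getElem_cons hplen
    rw [hdrop, List.take_succ_cons]
    congr 1
    simp [fget, PySem.List.pyGet?_natCast, List.getElem?_eq_getElem hplen]

-- ===== VERDICT (by name: the statement is the Claim_ definition above) =====
theorem getTokenContext_spec : Claim_equal_getTokenContext := by
  intro index tokenList _ hpre
  unfold Spec_getTokenContext getTokenContext getTokenContext_alt
  simp only []
  unfold Pre_getTokenContext at hpre
  set start := max 0 (index - 10) with hstart
  set stop := min (tokenList.length : Int) (index + 10 + 1) with hstop
  have h0s : 0 ≤ start := by omega
  have hse : start + 10 < stop := by omega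
  have helen : stop ≤ (tokenList.length : Int) := by omega
  -- name the underlying naturals
  obtain ⟨s, hs⟩ : ∃ s : Nat, start = (s : Int) := ⟨start.toNat, by omega⟩
  obtain ⟨e, he⟩ : ∃ e : Nat, stop = (e : Int) := ⟨stop.toNat, by omega⟩
  have hslen : s + 10 < e := by omega
  have helen' : e ≤ tokenList.length := by omega
  -- decompose the range at mid = start + 10
  have hsplit : PySem.List.pyRange start stop
      = PySem.List.pyRange start (start + 10) ++ ((start + 10) :: PySem.List.pyRange (start + 10 + 1) stop) := by
    rw [← PySem.List.pyRange_one_cons (by omega)]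
    exact PySem.List.pyRange_one_append start (start + 10) stop (by omega) (by omega)
  rw [hsplit, List.foldl_append]
  rw [foldl_stepA_before tokenList start 10 _ [] [] []
        (fun i hi => by have := PySem.List.mem_pyRange_one.mp hi; omega)]
  simp only [List.foldl_cons]
  have hmidstep : stepA tokenList start 10
      (([] : List String) ++ (PySem.List.pyRange start (start + 10)).map (fget tokenList), [], []) (start + 10)
      = (([] : List String) ++ (PySem.List.pyRange start (start + 10)).map (fget tokenList), [fget tokenList (start + 10)], []) := by
    unfold stepA
    rw [if_pos (by simp : (start + 10 - start == 10) = true)]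
    rfl
  rw [hmidstep]
  rw [foldl_stepA_after tokenList start 10 _ _ _ _
        (fun i hi => by have := PySem.List.mem_pyRange_one.mp hi; omega)]
  -- identify the two mapped ranges with B's slices
  have hb : (PySem.List.pyRange start (start + 10)).map (fget tokenList)
      = PySem.List.slice tokenList (some start) (some (start + 10)) := by
    have h10 : start + 10 = ((s + 10 : Nat) : Int) := by push_cast; omega
    rw [h10, hs, map_fget_pyRange tokenList 10 s (by omega),
        PySem.List.slice_natCast tokenList s (s + 10)]
    congr 1
    omega
  have ha : (PySem.List.pyRange (start + 10 + 1) stop).map (fget tokenList)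
      = PySem.List.slice tokenList (some (start + 10 + 1)) (some stop) := by
    have h11 : start + 10 + 1 = ((s + 11 : Nat) : Int) := by push_cast; omega
    have he' : stop = (((s + 11) + (e - (s + 11)) : Nat) : Int) := by push_cast; omega
    rw [h11, he', map_fget_pyRange tokenList (e - (s + 11)) (s + 11) (by omega),
        PySem.List.slice_natCast tokenList (s + 11) ((s + 11) + (e - (s + 11)))]
    congr 1
    omega
  simp only [List.nil_append, hb, ha]
  rfl
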